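-- pv_equiv track=rewrite | github.com/ubanerjee-1/personalprojects | N Queens/Nqueens.py | find_next_pos
-- ===== SOURCE A (Python) =====
-- N = 8
--
-- def find_next_pos(board, skip):
--     skipped = 0
--     for i,row in enumerate(board):
--         for j,cell in enumerate(row):
--             if cell == 0:
--                 if skipped == skip:
--                     return i,j
--                 else:
--                     skipped += 1
--     return N,N # No Open Positions Available
-- ===== SOURCE B (Python) =====
-- N = 8
--
-- def _nth_zero_col(row, k):
--     # column of the k-th zero of row; only called when row has more than k zeros
--     if row[0] == 0:
--         return 0 if k == 0 else 1 + _nth_zero_col(row[1:], k - 1)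
--     return 1 + _nth_zero_col(row[1:], k)
--
-- def find_next_pos(board, skip):
--     if skip < 0:
--         return N, N
--     k = skip
--     for r, row in enumerate(board):
--         c = row.count(0)
--         if k < c:
--             return r, _nth_zero_col(row, k)
--         k -= c
--     return N, N
-- ===== Notes on version B (the rewrite author's own statement) =====
-- stated objective: alternative
-- what changed: B works row-by-row with per-row zero counts: it skips whole rows by subtracting row.count(0) from the remaining skip, and only descends into the single row that contains the target, where a recursive helper locates the k-th zero column; A instead scans every cell with one global running counter.
import Mathlib
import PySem

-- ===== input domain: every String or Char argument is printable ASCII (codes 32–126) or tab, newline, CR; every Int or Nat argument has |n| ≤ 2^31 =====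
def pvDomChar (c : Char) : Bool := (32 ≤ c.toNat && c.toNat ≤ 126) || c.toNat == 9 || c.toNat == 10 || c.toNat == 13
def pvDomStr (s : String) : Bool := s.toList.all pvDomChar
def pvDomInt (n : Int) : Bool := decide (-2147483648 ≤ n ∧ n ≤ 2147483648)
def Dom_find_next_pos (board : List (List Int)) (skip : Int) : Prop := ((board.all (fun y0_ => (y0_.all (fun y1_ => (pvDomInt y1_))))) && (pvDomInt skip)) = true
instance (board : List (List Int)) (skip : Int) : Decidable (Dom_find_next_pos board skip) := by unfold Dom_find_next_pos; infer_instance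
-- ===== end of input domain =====

-- B skips whole rows by their zero counts and descends only into the target row; same return value as A's global cell counter (alternative decomposition).

-- ===== PORT A =====
-- inner loop: for j,cell in enumerate(row): returns (some (i,j), _) on early return,
-- otherwise (none, updated skipped)
def fnpRow (i : Int) (cells : List (Int × Int)) (skip skipped : Int) :
    Option (Int × Int) × Int :=
  match cells with
  | [] => (none, skipped)
  | (j, cell) :: rest =>
    if cell = 0 then
      if skipped = skip then (some (i, j), skipped)
      else fnpRow i rest skip (skipped + 1)
    else fnpRow i rest skip skipped

-- outer loop: for i,row in enumerate(board)
def fnpBoard (rows : List (Int × List Int)) (skip skipped : Int) : Int × Int :=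
  match rows with
  | [] => (8, 8)
  | (i, row) :: rest =>
    match fnpRow i (PySem.List.enumerate row) skip skipped with
    | (some p, _) => p
    | (none, sk) => fnpBoard rest skip sk

def find_next_pos (board : List (List Int)) (skip : Int) : Int × Int :=
  fnpBoard (PySem.List.enumerate board) skip 0

-- ===== PORT B =====
-- _nth_zero_col(row, k); for row = [] Python raises IndexError on row[0] — unreachable
-- under the caller's guarantee (row has more than k zeros); ported with a default 0 there.
def nthZeroCol (row : List Int) (k : Int) : Int :=
  match row with
  | [] => 0
  | x :: rest =>
    if x = 0 then (if k = 0 then 0 else 1 + nthZeroCol rest (k - 1))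
    else 1 + nthZeroCol rest k

-- loop: for r,row in enumerate(board): c = row.count(0); …
def fnpAltLoop (rows : List (Int × List Int)) (k : Int) : Int × Int :=
  match rows with
  | [] => (8, 8)
  | (r, row) :: rest =>
    let c : Int := PySem.List.count row 0
    if k < c then (r, nthZeroCol row k) else fnpAltLoop rest (k - c)

def find_next_pos_alt (board : List (List Int)) (skip : Int) : Int × Int :=
  if skip < 0 then (8, 8) else fnpAltLoop (PySem.List.enumerate board) skip

-- ===== PRECONDITION & SPEC =====
def Spec_find_next_pos (board : List (List Int)) (skip : Int) (out : Int × Int) : Prop := out = find_next_pos_alt board skip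
instance (board : List (List Int)) (skip : Int) (out : Int × Int) : Decidable (Spec_find_next_pos board skip out) := by unfold Spec_find_next_pos; infer_instance

-- ===== CLAIM (what is proved, stated in full; the proofs are below) =====
def Claim_equal_find_next_pos : Prop := ∀ (board : List (List Int)) (skip : Int), Dom_find_next_pos board skip → Spec_find_next_pos board skip (find_next_pos board skip)

-- ===== LEMMAS AND PROOFS =====

-- empty-cell coordinates of one enumerated row (proof-side characterization device)
def fnpEmptiesRow (i : Int) (cells : List (Int × Int)) : List (Int × Int) :=
  cells.filterMap (fun jc => if jc.2 = 0 then some (i, jc.1) else none)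

-- all empties of the remaining rows
def fnpAll (rows : List (Int × List Int)) : List (Int × Int) :=
  rows.flatMap (fun irow => fnpEmptiesRow irow.1 (PySem.List.enumerate irow.2))

-- A's inner scan, characterized by the row's empty-coordinate list
theorem fnpRow_found (i : Int) (cells : List (Int × Int)) (skip skipped : Int)
    (h1 : skipped ≤ skip)
    (h2 : skip - skipped < ((fnpEmptiesRow i cells).length : Int)) :
    ∃ s, fnpRow i cells skip skipped =
      (some ((fnpEmptiesRow i cells).getD (skip - skipped).toNat (8, 8)), s) := by
  induction cells generalizing skipped with
  | nil => simp [fnpEmptiesRow] at h2; omega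
  | cons jc rest ih =>
    obtain ⟨j, cell⟩ := jc
    by_cases hc : cell = 0
    · by_cases hs : skipped = skip
      · refine ⟨skipped, ?_⟩
        have : (skip - skipped).toNat = 0 := by omega
        simp [fnpRow, fnpEmptiesRow, hc, hs]
      · have h2' : skip - (skipped + 1) < ((fnpEmptiesRow i rest).length : Int) := by
          simp [fnpEmptiesRow, hc] at h2 ⊢; omega
        obtain ⟨s, hsr⟩ := ih (skipped + 1) (by omega) h2'
        refine ⟨s, ?_⟩
        have hn : (skip - skipped).toNat = (skip - (skipped + 1)).toNat + 1 := by omega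
        simp [fnpRow, fnpEmptiesRow, hc, hs, hsr, hn]
    · have h2' : skip - skipped < ((fnpEmptiesRow i rest).length : Int) := by
        simpa [fnpEmptiesRow, hc] using h2
      obtain ⟨s, hsr⟩ := ih skipped h1 h2'
      exact ⟨s, by simp [fnpRow, fnpEmptiesRow, hc, hsr]⟩

theorem fnpRow_none (i : Int) (cells : List (Int × Int)) (skip skipped : Int)
    (h : skip < skipped ∨ skipped + ((fnpEmptiesRow i cells).length : Int) ≤ skip) :
    fnpRow i cells skip skipped = (none, skipped + ((fnpEmptiesRow i cells).length : Int)) := by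
  induction cells generalizing skipped with
  | nil => simp [fnpRow, fnpEmptiesRow]
  | cons jc rest ih =>
    obtain ⟨j, cell⟩ := jc
    by_cases hc : cell = 0
    · have hlen : ((fnpEmptiesRow i ((j, cell) :: rest)).length : Int)
          = 1 + ((fnpEmptiesRow i rest).length : Int) := by
        simp [fnpEmptiesRow, hc]; omega
      have hs : skipped ≠ skip := by rw [hlen] at h; omega
      have h' : skip < skipped + 1 ∨ (skipped + 1) + ((fnpEmptiesRow i rest).length : Int) ≤ skip := by
        rw [hlen] at h; omega
      rw [show fnpRow i ((j, cell) :: rest) skip skipped = fnpRow i rest skip (skipped + 1) by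
        simp [fnpRow, hc, hs], ih (skipped + 1) h', hlen]
      exact Prod.ext rfl (by push_cast; ring)
    · have hlen : (fnpEmptiesRow i ((j, cell) :: rest)).length = (fnpEmptiesRow i rest).length := by
        simp [fnpEmptiesRow, hc]
      rw [hlen] at h
      rw [show fnpRow i ((j, cell) :: rest) skip skipped = fnpRow i rest skip skipped by
        simp [fnpRow, hc], hlen]
      exact ih skipped h

theorem fnpBoard_char (rows : List (Int × List Int)) (skip skipped : Int) :
    fnpBoard rows skip skipped =
      (if 0 ≤ skip - skipped ∧ skip - skipped < ((fnpAll rows).length : Int)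
       then (fnpAll rows).getD (skip - skipped).toNat (8, 8)
       else (8, 8)) := by
  induction rows generalizing skipped with
  | nil => simp [fnpBoard, fnpAll]
  | cons irow rest ih =>
    obtain ⟨i, row⟩ := irow
    have hall : fnpAll ((i, row) :: rest)
        = fnpEmptiesRow i (PySem.List.enumerate row) ++ fnpAll rest := by
      simp [fnpAll]
    have hlen : (fnpAll ((i, row) :: rest)).length
        = (fnpEmptiesRow i (PySem.List.enumerate row)).length + (fnpAll rest).length := by
      rw [hall]; simp
    by_cases hin : skipped ≤ skip ∧
        skip - skipped < ((fnpEmptiesRow i (PySem.List.enumerate row)).length : Int)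
    · obtain ⟨s, hsr⟩ := fnpRow_found i (PySem.List.enumerate row) skip skipped hin.1 hin.2
      rw [show fnpBoard ((i, row) :: rest) skip skipped
            = (fnpEmptiesRow i (PySem.List.enumerate row)).getD (skip - skipped).toNat (8, 8) by
          simp [fnpBoard, hsr]]
      rw [if_pos (by rw [hlen]; push_cast; omega), hall]
      have hlt : (skip - skipped).toNat < (fnpEmptiesRow i (PySem.List.enumerate row)).length := by
        omega
      rw [List.getD_eq_getElem?_getD, List.getD_eq_getElem?_getD,
        List.getElem?_append_left hlt]
    · have hn := fnpRow_none i (PySem.List.enumerate row) skip skipped (by omega)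
      rw [show fnpBoard ((i, row) :: rest) skip skipped
            = fnpBoard rest skip
                (skipped + ((fnpEmptiesRow i (PySem.List.enumerate row)).length : Int)) by
          simp [fnpBoard, hn]]
      rw [ih (skipped + ((fnpEmptiesRow i (PySem.List.enumerate row)).length : Int))]
      by_cases hc : 0 ≤ skip - (skipped + ((fnpEmptiesRow i (PySem.List.enumerate row)).length : Int)) ∧
          skip - (skipped + ((fnpEmptiesRow i (PySem.List.enumerate row)).length : Int))
            < ((fnpAll rest).length : Int)
      · rw [if_pos hc, if_pos (by rw [hlen]; push_cast; omega), hall]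
        have hge : (fnpEmptiesRow i (PySem.List.enumerate row)).length ≤ (skip - skipped).toNat := by
          omega
        have hidx : (skip - skipped).toNat - (fnpEmptiesRow i (PySem.List.enumerate row)).length
            = (skip - (skipped + ((fnpEmptiesRow i (PySem.List.enumerate row)).length : Int))).toNat := by
          omega
        rw [List.getD_eq_getElem?_getD, List.getD_eq_getElem?_getD,
          List.getElem?_append_right hge, hidx]
      · rw [if_neg hc, if_neg (by rw [hlen]; push_cast; omega)]

-- B-side: the row's empties list has length = count of zeros
theorem fnpEmptiesRow_length (i : Int) (row : List Int) (s : Int) :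
    (fnpEmptiesRow i (PySem.List.enumerate row s)).length = PySem.List.count row 0 := by
  rw [PySem.List.count_eq]
  induction row generalizing s with
  | nil => simp [fnpEmptiesRow]
  | cons x rest ih =>
    rw [PySem.List.enumerate_cons]
    by_cases hx : x = 0
    · simp [fnpEmptiesRow, hx]
      exact ih (s + 1)
    · simp [fnpEmptiesRow, hx]
      exact ih (s + 1)

-- B-side: nthZeroCol picks the k-th empty column
theorem fnpEmptiesRow_getD (i : Int) (row : List Int) (s k : Int)
    (h0 : 0 ≤ k) (h1 : k < (PySem.List.count row 0 : Int)) :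
    (fnpEmptiesRow i (PySem.List.enumerate row s)).getD k.toNat (8, 8)
      = (i, s + nthZeroCol row k) := by
  rw [PySem.List.count_eq] at h1
  induction row generalizing s k with
  | nil => simp at h1; omega
  | cons x rest ih =>
    rw [PySem.List.enumerate_cons]
    by_cases hx : x = 0
    · by_cases hk : k = 0
      · simp [fnpEmptiesRow, nthZeroCol, hx, hk]
      · have h1' : k - 1 < ((rest.count 0 : Nat) : Int) := by
          simp [hx] at h1; omega
        have hn : k.toNat = (k - 1).toNat + 1 := by omega
        rw [show fnpEmptiesRow i ((s, x) :: PySem.List.enumerate rest (s + 1))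
              = (i, s) :: fnpEmptiesRow i (PySem.List.enumerate rest (s + 1)) by
            simp [fnpEmptiesRow, hx]]
        rw [hn, List.getD_cons_succ, ih (s + 1) (k - 1) (by omega) h1']
        simp [nthZeroCol, hx, hk]; ring
    · have h1' : k < ((rest.count 0 : Nat) : Int) := by
        simpa [List.count_cons, hx] using h1
      rw [show fnpEmptiesRow i ((s, x) :: PySem.List.enumerate rest (s + 1))
            = fnpEmptiesRow i (PySem.List.enumerate rest (s + 1)) by
          simp [fnpEmptiesRow, hx]]
      rw [ih (s + 1) k h0 h1']
      simp [nthZeroCol, hx]; ring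

-- B-side loop characterization
theorem fnpAltLoop_char (rows : List (Int × List Int)) (k : Int) (h0 : 0 ≤ k) :
    fnpAltLoop rows k =
      (if k < ((fnpAll rows).length : Int)
       then (fnpAll rows).getD k.toNat (8, 8)
       else (8, 8)) := by
  induction rows generalizing k with
  | nil => simp [fnpAltLoop, fnpAll]
  | cons irow rest ih =>
    obtain ⟨r, row⟩ := irow
    have hall : fnpAll ((r, row) :: rest)
        = fnpEmptiesRow r (PySem.List.enumerate row) ++ fnpAll rest := by
      simp [fnpAll]
    have hcnt : (fnpEmptiesRow r (PySem.List.enumerate row)).length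
        = PySem.List.count row 0 := fnpEmptiesRow_length r row 0
    by_cases hk : k < (PySem.List.count row 0 : Int)
    · rw [show fnpAltLoop ((r, row) :: rest) k = (r, nthZeroCol row k) from by
        conv_lhs => rw [fnpAltLoop]
        rw [if_pos hk]]
      have hlt : k.toNat < (fnpEmptiesRow r (PySem.List.enumerate row)).length := by omega
      rw [if_pos (by rw [hall]; simp; omega), hall,
        List.getD_eq_getElem?_getD, List.getElem?_append_left hlt,
        ← List.getD_eq_getElem?_getD, fnpEmptiesRow_getD r row 0 k h0 hk]
      simp
    · rw [show fnpAltLoop ((r, row) :: rest) k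
          = fnpAltLoop rest (k - (PySem.List.count row 0 : Int)) from by
        conv_lhs => rw [fnpAltLoop]
        rw [if_neg hk]]
      rw [ih (k - (PySem.List.count row 0 : Int)) (by omega)]
      by_cases hc : k - (PySem.List.count row 0 : Int) < ((fnpAll rest).length : Int)
      · rw [if_pos hc, if_pos (by rw [hall]; simp; omega), hall]
        have hge : (fnpEmptiesRow r (PySem.List.enumerate row)).length ≤ k.toNat := by omega
        have hidx : k.toNat - (fnpEmptiesRow r (PySem.List.enumerate row)).length
            = (k - (PySem.List.count row 0 : Int)).toNat := by omega
        rw [List.getD_eq_getElem?_getD, List.getD_eq_getElem?_getD,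
          List.getElem?_append_right hge, hidx]
      · rw [if_neg hc, if_neg (by rw [hall]; simp; omega)]

-- ===== VERDICT (by name: the statement is the Claim_ definition above) =====
theorem find_next_pos_spec : Claim_equal_find_next_pos := by
  intro board skip _
  unfold Spec_find_next_pos find_next_pos find_next_pos_alt
  rw [fnpBoard_char]
  by_cases hneg : skip < 0
  · rw [if_pos hneg, if_neg (by omega)]
  · rw [if_neg hneg, fnpAltLoop_char _ _ (by omega)]
    simp only [sub_zero]
    by_cases hlt : skip < ((fnpAll (PySem.List.enumerate board)).length : Int)
    · rw [if_pos (by omega), if_pos hlt]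
    · rw [if_neg (by omega), if_neg hlt]
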